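-- pv_equiv track=rewrite | github.com/WallacePimentel/Prog.1 | Lab/Lab 7/Lab 7 - Exercício 4.py | conf_assentos_juntos
-- ===== SOURCE A (Python) =====
-- def conf_assentos_juntos(lista,b):
--     #Contador para as possíveis maneiras de se sentar
--     contador = 0
--     #Loop para passar por cada linha da matriz fornecida
--     for i in lista:
--         #Loop para ir de 0 até o tamanho da matriz menos a quantidade de assentos necessária, para não extrapolar na hora de utilizar os índices
--         for x in range(len(i) -b+1):
--             resultado = True
--             #Loop para passarmos da cadeira que estamos até a quantidade de assentos necessários, verificando se eles estão vazios
--             for z in range(b):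
--                 #Se não estiverem vazios, resultado é falso
--                 if i[x] != 0 or i[z+x] !=0:
--                     resultado = False
--             #Se estiverem, o resultado continua true e adicionamos 1 ao contador de maneiras de se sentar
--             if resultado == True:
--                 contador +=1
--     return contador
-- ===== SOURCE B (Python) =====
-- def conf_assentos_juntos(lista, b):
--     # One pass per row: run = length of the current streak of empty seats;
--     # each time the streak reaches b, one more block of b adjacent empty seats ends here.
--     total = 0
--     for linha in lista:
--         run = 0
--         for v in linha:
--             run = run + 1 if v == 0 else 0
--             if run >= b:
--                 total += 1
--     return total
-- ===== Notes on version B (the rewrite author's own statement) =====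
-- stated objective: alternative
-- what changed: Replaces the per-start rescan of each size-b window by a single zero-run pass per row that counts a window each time the streak of zeros reaches b; Pre_ excludes non-positive window sizes b, a meaningless corner on which A's vacuous inner loop yields len-b+1 per row while B's run count yields a different value.
-- outside the precondition, e.g. on conf_assentos_juntos([[0, 0]], 0): A returns 3, B returns 2; on conf_assentos_juntos([[0]], -1): A returns 3, B returns 1
import Mathlib
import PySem

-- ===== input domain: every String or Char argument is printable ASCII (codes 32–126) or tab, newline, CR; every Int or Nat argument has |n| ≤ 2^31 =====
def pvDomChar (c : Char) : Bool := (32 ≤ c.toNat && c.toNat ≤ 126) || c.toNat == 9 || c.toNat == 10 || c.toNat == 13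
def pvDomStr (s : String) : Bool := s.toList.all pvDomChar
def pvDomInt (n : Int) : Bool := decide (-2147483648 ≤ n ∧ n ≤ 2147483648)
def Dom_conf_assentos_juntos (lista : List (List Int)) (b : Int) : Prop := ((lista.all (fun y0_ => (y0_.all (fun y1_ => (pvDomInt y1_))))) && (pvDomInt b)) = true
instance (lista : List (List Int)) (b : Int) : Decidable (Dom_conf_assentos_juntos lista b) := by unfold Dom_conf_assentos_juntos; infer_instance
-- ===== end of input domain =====

-- B replaces A's per-start rescan of each size-b window by a single zero-run pass per row (a different algorithm; return-value equivalence proved for b ≥ 1).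


-- ===== PORT A =====
-- Literal port of A.  i[x] and i[z+x] are ported with pyGetD (default 0): whenever the
-- innermost loop body runs under Pre_ (b ≥ 1), 0 ≤ x ≤ len i - b and 0 ≤ z ≤ b - 1, so both
-- indices are in range and pyGetD is exact there (the Python never raises).
def conf_assentos_juntos (lista : List (List Int)) (b : Int) : Int :=
  lista.foldl (fun contador i =>
    (PySem.List.pyRange 0 (PySem.List.len i - b + 1) 1).foldl (fun contador x =>
      let resultado :=
        (PySem.List.pyRange 0 b 1).foldl (fun resultado z =>
          if PySem.List.pyGetD i x 0 ≠ 0 ∨ PySem.List.pyGetD i (z + x) 0 ≠ 0 then false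
          else resultado) true
      if resultado = true then contador + 1 else contador) contador) 0

-- ===== PORT B =====
-- Port of Source B: per row, one pass keeping (run, total); run = current streak of zeros.
def conf_assentos_juntos_alt (lista : List (List Int)) (b : Int) : Int :=
  lista.foldl (fun total linha =>
    (linha.foldl (fun (s : Int × Int) v =>
      let run := if v = 0 then s.1 + 1 else 0
      (run, if run ≥ b then s.2 + 1 else s.2)) ((0 : Int), total)).2) 0

-- ===== PRECONDITION & SPEC =====
-- Pre_ excludes non-positive window sizes b (on which A still returns: its empty inner loop
-- vacuously accepts every start position, an artefact-laden corner no caller of a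
-- seat-counting function would specify); for b ≥ 1 nothing is excluded.
def Pre_conf_assentos_juntos (lista : List (List Int)) (b : Int) : Prop := 1 ≤ b
instance (lista : List (List Int)) (b : Int) : Decidable (Pre_conf_assentos_juntos lista b) := by unfold Pre_conf_assentos_juntos; infer_instance
def pvWitness_conf_assentos_juntos : List (List Int) × Int := ([[0, 0, 1], [1, 0, 0]], 2)

def Spec_conf_assentos_juntos (lista : List (List Int)) (b : Int) (out : Int) : Prop := out = conf_assentos_juntos_alt lista b
instance (lista : List (List Int)) (b : Int) (out : Int) : Decidable (Spec_conf_assentos_juntos lista b out) := by unfold Spec_conf_assentos_juntos; infer_instance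

-- ===== CLAIM (what is proved, stated in full; the proofs are below) =====
def Claim_equal_conf_assentos_juntos : Prop := ∀ (lista : List (List Int)) (b : Int), Dom_conf_assentos_juntos lista b → Pre_conf_assentos_juntos lista b → Spec_conf_assentos_juntos lista b (conf_assentos_juntos lista b)

-- ===== LEMMAS AND PROOFS =====

-- counting function mirrored by B's run/total fold (run and the window size as naturals)
def cntB (bn : Nat) : Nat → List Int → Nat
  | _, [] => 0
  | run, v :: vs => if v = 0 then (if bn ≤ run + 1 then 1 else 0) + cntB bn (run + 1) vs else cntB bn 0 vs

-- "the size-bn window of (0^r ++ l) ending at position r + j is all zero"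
def wz (bn r : Nat) (l : List Int) (j : Nat) : Bool :=
  decide (bn ≤ j + 1 + r) && ((l.take (j + 1)).drop (j + 1 - bn)).all (fun e => e == 0)

-- all-zero windows counted by their END position (with r zeros padded on the left)
def wcount (bn r : Nat) (l : List Int) : Nat := (List.range l.length).countP (wz bn r l)

-- all-zero windows counted by their START position: the quantity A computes per row (b ≥ 1)
def wstart (bn : Nat) (l : List Int) : Nat :=
  (List.range (l.length + 1 - bn)).countP (fun x => ((l.drop x).take bn).all (fun e => e == 0))

lemma wz_zero (bn r : Nat) (hbn : 1 ≤ bn) (v : Int) (vs : List Int) :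
    wz bn r (v :: vs) 0 = (decide (bn ≤ 1 + r) && (v == 0)) := by
  simp [wz, Nat.sub_eq_zero_of_le hbn]

lemma wz_cons (bn r : Nat) (v : Int) (vs : List Int) (j : Nat) :
    wz bn r (v :: vs) (j + 1) = if v = 0 then wz bn (r + 1) vs j else wz bn 0 vs j := by
  unfold wz
  have e1 : j + 1 + 1 + r = j + 1 + (r + 1) := by omega
  rw [e1, List.take_succ_cons]
  rcases Nat.lt_or_ge (j + 1) bn with h | h
  · have h2 : j + 1 + 1 - bn = 0 := by omega
    have h3 : j + 1 - bn = 0 := by omega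
    rw [h2, h3, List.drop_zero, List.drop_zero]
    by_cases hv : v = 0
    · simp [hv]
    · have t : ¬ (bn ≤ j + 1 + 0) := by omega
      simp [hv, t]
  · have h2 : j + 1 + 1 - bn = (j + 1 - bn) + 1 := by omega
    rw [h2, List.drop_succ_cons]
    by_cases hv : v = 0
    · simp [hv]
    · have t1 : bn ≤ j + 1 + (r + 1) := by omega
      have t2 : bn ≤ j + 1 + 0 := by omega
      simp [hv, t1, t2]

lemma wcount_cons (bn r : Nat) (hbn : 1 ≤ bn) (v : Int) (vs : List Int) :
    wcount bn r (v :: vs) =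
      (if v = 0 ∧ bn ≤ r + 1 then 1 else 0) + (if v = 0 then wcount bn (r + 1) vs else wcount bn 0 vs) := by
  unfold wcount
  rw [List.length_cons, List.range_succ_eq_map, List.countP_cons, List.countP_map]
  have e : ∀ j ∈ List.range vs.length, ((wz bn r (v :: vs) ∘ Nat.succ) j = true) ↔ ((fun j => if v = 0 then wz bn (r + 1) vs j else wz bn 0 vs j) j = true) := by
    intro j _; simp only [Function.comp_apply, Nat.succ_eq_add_one, wz_cons bn r v vs j]
  rw [List.countP_congr e]
  rw [wz_zero bn r hbn v vs]
  by_cases hv : v = 0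
  · by_cases hr : bn ≤ r + 1
    · simp [hv, hr, Nat.add_comm]
    · have h1 : ¬ bn ≤ 1 + r := by omega
      simp [hv, hr, h1]
  · simp [hv]

lemma cntB_eq_wcount (bn : Nat) (hbn : 1 ≤ bn) :
    ∀ (l : List Int) (r : Nat), cntB bn r l = wcount bn r l := by
  intro l
  induction l with
  | nil => intro r; simp [cntB, wcount]
  | cons v vs ih =>
    intro r
    rw [wcount_cons bn r hbn v vs, cntB]
    by_cases hv : v = 0
    · by_cases hr : bn ≤ r + 1 <;> simp [hv, hr, ih]
    · simp [hv, ih]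

-- B's row fold computes total + cntB
lemma B_row (b : Int) (hb : 1 ≤ b) :
    ∀ (l : List Int) (rn : Nat) (total : Int),
      (l.foldl (fun (s : Int × Int) v =>
        let run := if v = 0 then s.1 + 1 else 0
        (run, if run ≥ b then s.2 + 1 else s.2)) ((rn : Int), total)).2
      = total + (cntB b.toNat rn l : Int) := by
  intro l
  induction l with
  | nil => intro rn total; simp [cntB]
  | cons v vs ih =>
    intro rn total
    rw [List.foldl_cons, cntB]
    by_cases hv : v = 0
    · by_cases hr : b.toNat ≤ rn + 1
      · have hacc : (let run := if v = 0 then ((rn : Int), total).1 + 1 else 0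
            (run, if run ≥ b then ((rn : Int), total).2 + 1 else ((rn : Int), total).2)) = (((rn + 1 : Nat) : Int), total + 1) := by
          have h2 : b ≤ (rn : Int) + 1 := by omega
          simp [hv, h2]
        rw [hacc, ih (rn + 1) (total + 1)]
        simp [hv, hr]; ring
      · have hacc : (let run := if v = 0 then ((rn : Int), total).1 + 1 else 0
            (run, if run ≥ b then ((rn : Int), total).2 + 1 else ((rn : Int), total).2)) = (((rn + 1 : Nat) : Int), total) := by
          have h2 : ¬ (b ≤ (rn : Int) + 1) := by omega
          simp [hv, h2]
        rw [hacc, ih (rn + 1) total]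
        simp [hv, hr]
    · have hacc : (let run := if v = 0 then ((rn : Int), total).1 + 1 else 0
          (run, if run ≥ b then ((rn : Int), total).2 + 1 else ((rn : Int), total).2)) = (((0 : Nat) : Int), total) := by
        have h2 : ¬ (b ≤ (0 : Int)) := by omega
        simp [hv, h2]
      rw [hacc, ih 0 total]
      simp [hv]

-- reindexing window ends to window starts
lemma wcount_eq_wstart (bn : Nat) (hbn : 1 ≤ bn) (l : List Int) : wcount bn 0 l = wstart bn l := by
  unfold wcount wstart
  rcases Nat.lt_or_ge l.length bn with h | h
  · rw [List.countP_eq_zero.mpr, List.countP_eq_zero.mpr]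
    · intro x hx
      rw [List.mem_range] at hx
      exact absurd hx (by omega)
    · intro j hj
      rw [List.mem_range] at hj
      simp [wz]
      omega
  · have e : l.length = (bn - 1) + (l.length + 1 - bn) := by omega
    rw [e, List.range_add, List.countP_append, List.countP_map]
    have h0 : (List.range (bn - 1)).countP (wz bn 0 l) = 0 := by
      rw [List.countP_eq_zero]
      intro j hj
      rw [List.mem_range] at hj
      simp [wz]
      omega
    rw [h0, Nat.zero_add]
    have e4 : bn - 1 + (l.length + 1 - bn) + 1 - bn = l.length + 1 - bn := by omega
    rw [e4]
    apply List.countP_congr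
    intro x _
    simp only [Function.comp_apply]
    unfold wz
    have e1 : bn - 1 + x + 1 = x + bn := by omega
    have e2 : x + bn - bn = x := by omega
    rw [e1, e2, List.drop_take]
    simp

-- A's inner boolean fold is an 'all'
lemma foldl_false_all {α : Type} (p : α → Prop) [DecidablePred p] :
    ∀ (l : List α) (a : Bool),
      (l.foldl (fun res z => if p z then false else res) a) = (a && l.all (fun z => !(decide (p z)))) := by
  intro l
  induction l with
  | nil => intro a; simp
  | cons x xs ih => intro a; rw [List.foldl_cons, ih]; by_cases h : p x <;> simp [h]

lemma take_drop_all_iff (l : List Int) (k bn : Nat) (hk : k + bn ≤ l.length) :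
    (((l.drop k).take bn).all (fun e => e == 0) = true) ↔ (∀ zn, zn < bn → l.getD (zn + k) 0 = 0) := by
  rw [List.all_eq_true]
  constructor
  · intro hall zn hzn
    have hlt : zn + k < l.length := by omega
    rw [List.getD_eq_getElem l 0 hlt]
    apply (by simp : ∀ x : Int, (x == 0) = true → x = 0)
    apply hall
    rw [List.mem_iff_getElem]
    have hlen : ((l.drop k).take bn).length = bn := by
      simp [List.length_take, List.length_drop]; omega
    refine ⟨zn, by omega, ?_⟩
    rw [List.getElem_take, List.getElem_drop]
    congr 1; omega
  · intro h e he
    rw [List.mem_iff_getElem] at he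
    obtain ⟨i, hi, hei⟩ := he
    have hlen : ((l.drop k).take bn).length = bn := by
      simp [List.length_take, List.length_drop]; omega
    rw [List.getElem_take, List.getElem_drop] at hei
    have h1 : l.getD (i + k) 0 = l[k + i] := by
      rw [List.getD_eq_getElem l 0 (by omega)]; congr 1; omega
    have := h i (by omega)
    simp_all

lemma A_window (b : Int) (hb : 1 ≤ b) (l : List Int) (k : Nat) (hk : k + b.toNat ≤ l.length) :
    ((PySem.List.pyRange 0 b 1).foldl (fun resultado z =>
        if PySem.List.pyGetD l (k : Int) 0 ≠ 0 ∨ PySem.List.pyGetD l (z + (k : Int)) 0 ≠ 0 then false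
        else resultado) true)
      = ((l.drop k).take b.toNat).all (fun e => e == 0) := by
  rw [foldl_false_all (fun z => PySem.List.pyGetD l (k : Int) 0 ≠ 0 ∨ PySem.List.pyGetD l (z + (k : Int)) 0 ≠ 0)]
  rw [Bool.true_and, PySem.List.pyRange_one, List.all_map, Bool.eq_iff_iff]
  rw [List.all_eq_true, take_drop_all_iff l k b.toNat hk]
  constructor
  · intro h zn hzn
    have := h zn (by rw [List.mem_range]; omega)
    simp only [Function.comp_apply, Bool.not_eq_eq_eq_not, Bool.not_true, decide_eq_false_iff_not,
      not_or, not_not] at this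
    obtain ⟨h1, h2⟩ := this
    have e1 : (0 : Int) + (zn : Int) + (k : Int) = ((zn + k : Nat) : Int) := by push_cast; ring
    rw [e1, PySem.List.pyGetD_natCast] at h2
    exact h2
  · intro h zn hzn
    rw [List.mem_range] at hzn
    simp only [Function.comp_apply, Bool.not_eq_eq_eq_not, Bool.not_true, decide_eq_false_iff_not,
      not_or, not_not]
    have hbn : 1 ≤ b.toNat := by omega
    constructor
    · have := h 0 (by omega)
      simpa [PySem.List.pyGetD_natCast] using this
    · have := h zn (by omega)
      have e1 : (0 : Int) + (zn : Int) + (k : Int) = ((zn + k : Nat) : Int) := by push_cast; ring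
      rw [e1, PySem.List.pyGetD_natCast]
      exact this

-- A's row double loop computes contador + wstart (b ≥ 1)
lemma A_row (b : Int) (hb : 1 ≤ b) (l : List Int) (contador : Int) :
    (PySem.List.pyRange 0 (PySem.List.len l - b + 1) 1).foldl (fun contador x =>
      let resultado :=
        (PySem.List.pyRange 0 b 1).foldl (fun resultado z =>
          if PySem.List.pyGetD l x 0 ≠ 0 ∨ PySem.List.pyGetD l (z + x) 0 ≠ 0 then false
          else resultado) true
      if resultado = true then contador + 1 else contador) contador
    = contador + (wstart b.toNat l : Int) := by
  show (PySem.List.pyRange 0 ((PySem.List.len l) - b + 1) 1).foldl (fun contador x =>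
      if ((PySem.List.pyRange 0 b 1).foldl (fun resultado z =>
          if PySem.List.pyGetD l x 0 ≠ 0 ∨ PySem.List.pyGetD l (z + x) 0 ≠ 0 then false
          else resultado) true) = true then contador + 1 else contador) contador
    = contador + (wstart b.toNat l : Int)
  rw [PySem.List.foldl_ite_add_one]
  rw [PySem.List.len_eq]
  rw [PySem.List.pyRange_one 0 ((l.length : Int) - b + 1), List.countP_map]
  unfold wstart
  congr 1
  have e : ((l.length : Int) - b + 1 - 0).toNat = l.length + 1 - b.toNat := by omega
  rw [e]
  norm_cast
  apply List.countP_congr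
  intro k hk
  rw [List.mem_range] at hk
  simp only [Function.comp_apply]
  have hk2 : k + b.toNat ≤ l.length := by omega
  rw [(by omega : 0 + k = k), A_window b hb l k hk2]
  simp

-- per-row equality: A's row step equals B's row step (b ≥ 1)
lemma row_eq (b : Int) (hb : 1 ≤ b) (l : List Int) (contador : Int) :
    (PySem.List.pyRange 0 (PySem.List.len l - b + 1) 1).foldl (fun contador x =>
      let resultado :=
        (PySem.List.pyRange 0 b 1).foldl (fun resultado z =>
          if PySem.List.pyGetD l x 0 ≠ 0 ∨ PySem.List.pyGetD l (z + x) 0 ≠ 0 then false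
          else resultado) true
      if resultado = true then contador + 1 else contador) contador
    = (l.foldl (fun (s : Int × Int) v =>
        let run := if v = 0 then s.1 + 1 else 0
        (run, if run ≥ b then s.2 + 1 else s.2)) ((0 : Int), contador)).2 := by
  have hbn : 1 ≤ b.toNat := by omega
  rw [A_row b hb l contador]
  have hB := B_row b hb l 0 contador
  rw [Nat.cast_zero] at hB
  rw [hB, cntB_eq_wcount b.toNat hbn l 0, wcount_eq_wstart b.toNat hbn l]

-- ===== VERDICT (by name: the statement is the Claim_ definition above) =====
theorem conf_assentos_juntos_spec : Claim_equal_conf_assentos_juntos := by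
  intro lista b _ hb
  unfold Spec_conf_assentos_juntos conf_assentos_juntos conf_assentos_juntos_alt
  have hb1 : 1 ≤ b := hb
  have main : ∀ (ls : List (List Int)) (c : Int),
      ls.foldl (fun contador i =>
        (PySem.List.pyRange 0 (PySem.List.len i - b + 1) 1).foldl (fun contador x =>
          let resultado :=
            (PySem.List.pyRange 0 b 1).foldl (fun resultado z =>
              if PySem.List.pyGetD i x 0 ≠ 0 ∨ PySem.List.pyGetD i (z + x) 0 ≠ 0 then false
              else resultado) true
          if resultado = true then contador + 1 else contador) contador) c
      = ls.foldl (fun total linha =>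
          (linha.foldl (fun (s : Int × Int) v =>
            let run := if v = 0 then s.1 + 1 else 0
            (run, if run ≥ b then s.2 + 1 else s.2)) ((0 : Int), total)).2) c := by
    intro ls
    induction ls with
    | nil => intro c; rfl
    | cons l t ih =>
      intro c
      rw [List.foldl_cons, List.foldl_cons, row_eq b hb1 l c]
      exact ih _
  exact main lista 0
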